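-- pv_equiv track=rewrite | github.com/destrex271/WebActuary | final_report.py | format_issuer
-- ===== SOURCE A (Python) =====
-- def format_issuer(issuer):
--     x = ""
--     cnt = 0
--     i = 0
--     li = 0
--     for ie in issuer:
--         if ie == ',':
--             cnt += 1
--         if cnt == 2:
--             y = issuer[li + 1:i]
--             x += "\r" + "\t" + y.replace(",", " : ").strip()
--             cnt = 0
--             li = i
--         i += 1
--     return x.replace("Name", " name")
-- ===== SOURCE B (Python) =====
-- def format_issuer(issuer):
--     # Collect comma positions once, then emit one group per pair of commas.
--     pos = [i for i, c in enumerate(issuer) if c == ',']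
--     out = []
--     for j in range(len(pos) // 2):
--         start = (pos[2 * j - 1] if j else 0) + 1
--         stop = pos[2 * j + 1]
--         out.append('\r\t' + issuer[start:stop].replace(',', ' : ').strip())
--     return ''.join(out).replace('Name', ' name')
-- ===== Notes on version B (the rewrite author's own statement) =====
-- stated objective: alternative
-- what changed: Replaced A's stateful character scan (comma counter, running index, last-cut marker) with a one-shot list of comma positions and a closed-form pairwise loop that slices each group directly.
import Mathlib
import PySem

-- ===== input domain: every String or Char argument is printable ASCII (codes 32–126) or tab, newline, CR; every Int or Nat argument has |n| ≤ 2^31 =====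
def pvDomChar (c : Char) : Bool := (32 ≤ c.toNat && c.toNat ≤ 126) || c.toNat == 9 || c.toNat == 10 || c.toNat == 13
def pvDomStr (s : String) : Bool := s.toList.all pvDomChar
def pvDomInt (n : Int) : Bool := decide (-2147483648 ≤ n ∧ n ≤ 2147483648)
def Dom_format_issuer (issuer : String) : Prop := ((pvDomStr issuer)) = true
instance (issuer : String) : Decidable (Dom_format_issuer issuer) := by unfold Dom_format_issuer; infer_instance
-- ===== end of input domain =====

-- B replaces A's stateful character scan (comma counter / running index / last-cut marker)
-- with a one-shot list of comma positions and a closed-form pairwise loop; same O(n) cost.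


-- ===== PORT A =====
-- one step of A's for-loop; state = (x, cnt, i, li)
def formatStepA (issuer : List Char) (st : List Char × Nat × Nat × Nat) (ie : Char) :
    List Char × Nat × Nat × Nat :=
  let x := st.1
  let cnt := st.2.1
  let i := st.2.2.1
  let li := st.2.2.2
  let cnt := if ie = ',' then cnt + 1 else cnt
  if cnt = 2 then
    let y := PySem.List.slice issuer (some ((li : Int) + 1)) (some (i : Int))
    (x ++ ('\r' :: '\t' :: PySem.Chars.strip (PySem.Chars.replace y [','] " : ".toList)),
     0, i + 1, i)
  else
    (x, cnt, i + 1, li)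

def format_issuer (issuer : String) : String :=
  let cs := issuer.toList
  let r := cs.foldl (formatStepA cs) ([], 0, 0, 0)
  String.ofList (PySem.Chars.replace r.1 "Name".toList " name".toList)

-- ===== PORT B =====
def format_issuer_alt (issuer : String) : String :=
  let cs := issuer.toList
  -- pos = [i for i, c in enumerate(issuer) if c == ',']
  let pos : List Int := ((PySem.List.enumerate cs 0).filter (fun p => p.2 == ',')).map (·.1)
  -- for j in range(len(pos) // 2): emit issuer[start:stop]
  let out := (List.range (pos.length / 2)).map (fun j =>
    let start := (if j = 0 then 0 else pos.getD (2 * j - 1) 0) + 1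
    let stop := pos.getD (2 * j + 1) 0
    '\r' :: '\t' ::
      PySem.Chars.strip (PySem.Chars.replace (PySem.List.slice cs (some start) (some stop))
        [','] " : ".toList))
  String.ofList (PySem.Chars.replace out.flatten "Name".toList " name".toList)

-- ===== PRECONDITION & SPEC =====
def Spec_format_issuer (issuer : String) (out : String) : Prop := out = format_issuer_alt issuer
instance (issuer : String) (out : String) : Decidable (Spec_format_issuer issuer out) := by unfold Spec_format_issuer; infer_instance

-- ===== CLAIM (what is proved, stated in full; the proofs are below) =====
def Claim_equal_format_issuer : Prop := ∀ (issuer : String), Dom_format_issuer issuer → Spec_format_issuer issuer (format_issuer issuer)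

-- ===== LEMMAS AND PROOFS =====

-- one emitted group: '\r\t' + issuer[li+1:p].replace(',',' : ').strip()
def pvEmit (cs : List Char) (li p : Int) : List Char :=
  '\r' :: '\t' ::
    PySem.Chars.strip (PySem.Chars.replace (PySem.List.slice cs (some (li + 1)) (some p))
      [','] " : ".toList)

-- positions of the commas of a list, starting at offset i
def pvCommaPos (cs : List Char) (i : Int) : List Int :=
  match cs with
  | [] => []
  | c :: rest => if c = ',' then i :: pvCommaPos rest (i + 1) else pvCommaPos rest (i + 1)

-- A's emission process as a recursion over the comma positions;
-- the Bool is "cnt = 1" (one comma of the current pair already seen)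
def pvRender (cs : List Char) (li : Int) (h : Bool) (ps : List Int) : List Char :=
  match ps, h with
  | [], _ => []
  | _ :: ps, false => pvRender cs li true ps
  | p :: ps, true => pvEmit cs li p ++ pvRender cs p false ps

-- B's closed form (pair starts at the previous pair's second comma)
def pvClosed (cs : List Char) (li : Int) (ps : List Int) : List Char :=
  ((List.range (ps.length / 2)).map (fun j =>
    pvEmit cs (if j = 0 then li else ps.getD (2 * j - 1) 0) (ps.getD (2 * j + 1) 0))).flatten

-- closed form in the "one comma already seen" phase
def pvClosedH (cs : List Char) (li : Int) (ps : List Int) : List Char :=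
  ((List.range ((ps.length + 1) / 2)).map (fun j =>
    pvEmit cs (if j = 0 then li else ps.getD (2 * j - 2) 0) (ps.getD (2 * j) 0))).flatten

lemma pvCommaPos_enumerate (cs : List Char) (s : Int) :
    ((PySem.List.enumerate cs s).filter (fun p => p.2 == ',')).map (·.1) = pvCommaPos cs s := by
  induction cs generalizing s with
  | nil => simp [PySem.List.enumerate_nil, pvCommaPos]
  | cons c rest ih =>
    rw [PySem.List.enumerate_cons]
    by_cases h : c = ','
    · simp [pvCommaPos, h, ih]
    · simp [pvCommaPos, h, ih]

lemma pvClosed_cons (cs : List Char) (li p : Int) (ps : List Int) :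
    pvClosed cs li (p :: ps) = pvClosedH cs li ps := by
  unfold pvClosed pvClosedH
  have hlen : (p :: ps).length / 2 = (ps.length + 1) / 2 := by simp
  rw [hlen]
  congr 1
  apply List.map_congr_left
  intro j _
  rcases j with _ | k
  · simp
  · have e1 : 2 * (k + 1) - 1 = 2 * k + 1 := by omega
    have e2 : 2 * (k + 1) + 1 = 2 * k + 2 + 1 := by omega
    have e3 : 2 * (k + 1) - 2 = 2 * k := by omega
    have e5 : 2 * (k + 1) = 2 * k + 2 := by omega
    rw [e1, e2, e3, e5]
    simp

lemma pvClosedH_cons (cs : List Char) (li p : Int) (ps : List Int) :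
    pvClosedH cs li (p :: ps) = pvEmit cs li p ++ pvClosed cs p ps := by
  unfold pvClosed pvClosedH
  have hlen : ((p :: ps).length + 1) / 2 = ps.length / 2 + 1 := by
    simp; omega
  rw [hlen, List.range_succ_eq_map]
  simp only [List.map_cons, List.map_map, List.flatten_cons]
  congr 1
  congr 1
  apply List.map_congr_left
  intro k _
  simp only [Function.comp_apply]
  rcases k with _ | m
  · simp
  · simp only [Nat.succ_eq_add_one]
    have eL1 : 2 * (m + 1 + 1) - 2 = 2 * m + 1 + 1 := by omega
    have eL2 : 2 * (m + 1 + 1) = 2 * m + 3 + 1 := by omega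
    have eR1 : 2 * (m + 1) - 1 = 2 * m + 1 := by omega
    have eR2 : 2 * (m + 1) + 1 = 2 * m + 3 := by omega
    rw [eL1, eL2, eR1, eR2]
    simp

lemma pvRender_eq_closed (cs : List Char) (ps : List Int) :
    (∀ li, pvRender cs li false ps = pvClosed cs li ps) ∧
    (∀ li, pvRender cs li true ps = pvClosedH cs li ps) := by
  induction ps with
  | nil =>
    constructor <;> intro li <;> simp [pvRender, pvClosed, pvClosedH]
  | cons p ps ih =>
    constructor
    · intro li
      rw [show pvRender cs li false (p :: ps) = pvRender cs li true ps from rfl,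
          ih.2 li, pvClosed_cons]
    · intro li
      rw [show pvRender cs li true (p :: ps) = pvEmit cs li p ++ pvRender cs p false ps from rfl,
          ih.1 p, pvClosedH_cons]

-- the loop invariant: A's fold, started in a clean state, appends exactly pvRender
lemma pvFoldA (issuer : List Char) (rest : List Char) :
    ∀ (x : List Char) (cnt i li : Nat), cnt = 0 ∨ cnt = 1 →
      (rest.foldl (formatStepA issuer) (x, cnt, i, li)).1
        = x ++ pvRender issuer (li : Int) (cnt == 1) (pvCommaPos rest (i : Int)) := by
  induction rest with
  | nil => intro x cnt i li _; simp [pvCommaPos, pvRender]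
  | cons c rest ih =>
    intro x cnt i li hcnt
    by_cases hc : c = ','
    · rcases hcnt with h0 | h1
      · subst h0
        have hstep : formatStepA issuer (x, 0, i, li) c = (x, 1, i + 1, li) := by
          simp [formatStepA, hc]
        rw [List.foldl_cons, hstep, ih x 1 (i + 1) li (Or.inr rfl)]
        simp [pvCommaPos, hc, pvRender]
      · subst h1
        have hstep : formatStepA issuer (x, 1, i, li) c
            = (x ++ pvEmit issuer (li : Int) (i : Int), 0, i + 1, i) := by
          simp [formatStepA, hc, pvEmit]
        rw [List.foldl_cons, hstep,
            ih (x ++ pvEmit issuer (li : Int) (i : Int)) 0 (i + 1) i (Or.inl rfl)]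
        simp [pvCommaPos, hc, pvRender]
    · have hstep : formatStepA issuer (x, cnt, i, li) c = (x, cnt, i + 1, li) := by
        have : cnt ≠ 2 := by omega
        simp [formatStepA, hc, this]
      rw [List.foldl_cons, hstep, ih x cnt (i + 1) li hcnt]
      simp [pvCommaPos, hc]

-- the fold from the initial state, cast-free
lemma pvFoldA_zero (cs : List Char) :
    (cs.foldl (formatStepA cs) ([], 0, 0, 0)).1 = pvClosed cs 0 (pvCommaPos cs 0) := by
  have h := pvFoldA cs cs [] 0 0 0 (Or.inl rfl)
  simp only [Nat.cast_zero, List.nil_append] at h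
  rw [h]
  exact (pvRender_eq_closed cs (pvCommaPos cs 0)).1 0

-- ===== VERDICT (by name: the statement is the Claim_ definition above) =====
theorem format_issuer_spec : Claim_equal_format_issuer := by
  intro issuer _
  show format_issuer issuer = format_issuer_alt issuer
  unfold format_issuer format_issuer_alt
  simp only [pvFoldA_zero, pvCommaPos_enumerate, pvClosed, pvEmit]
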